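-- pv_equiv track=rewrite | github.com/SHArdowYT/prosperity | trader_submission.py | process_popular_average
-- ===== SOURCE A (Python) =====
-- def process_popular_average(orders, ask_mode: bool):
--     prices = []
--     ask_volume = 0
--     for price, volume in list(orders):
--         if ((volume < ask_volume) and ask_mode) or ((volume > ask_volume) and not ask_mode):
--             prices = [price]
--         elif volume == ask_volume:
--             prices.append(price)
--
--     # prices_sum = sum(prices)
--     # prices_length = len(prices)
--     return sum(prices), len(prices)
-- ===== SOURCE B (Python) =====
-- def process_popular_average(orders, ask_mode: bool):
--     # Backward scan: tally zero-volume prices until the last "reset" entry, which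
--     # also contributes its own price and ends the scan.
--     s = 0
--     c = 0
--     for price, volume in reversed(list(orders)):
--         if volume == 0:
--             s += price
--             c += 1
--         elif (volume < 0) if ask_mode else (volume > 0):
--             return s + price, c + 1
--     return s, c
-- ===== Notes on version B (the rewrite author's own statement) =====
-- stated objective: simpler
-- what changed: Replaces the forward reset-and-append list accumulation with a single backward scan that keeps running (sum, count) accumulators and stops at the last reset entry, never materializing the price list.
import Mathlib
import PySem

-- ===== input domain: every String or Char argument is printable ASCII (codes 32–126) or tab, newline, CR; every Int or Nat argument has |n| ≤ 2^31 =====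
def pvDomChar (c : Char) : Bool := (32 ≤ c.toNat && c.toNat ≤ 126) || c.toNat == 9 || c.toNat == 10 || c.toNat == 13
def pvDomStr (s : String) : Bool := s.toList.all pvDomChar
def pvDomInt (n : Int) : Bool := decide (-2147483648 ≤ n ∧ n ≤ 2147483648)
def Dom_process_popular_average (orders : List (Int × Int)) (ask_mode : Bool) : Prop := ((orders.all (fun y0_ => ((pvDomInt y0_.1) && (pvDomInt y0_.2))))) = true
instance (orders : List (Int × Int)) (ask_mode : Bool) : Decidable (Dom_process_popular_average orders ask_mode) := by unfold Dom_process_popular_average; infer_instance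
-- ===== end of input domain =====

-- B replaces A's forward reset-and-append list accumulation with a backward scan keeping running (sum, count) accumulators that stops at the last reset entry (simpler; no price list built).


-- ===== PORT A =====
-- step of A's loop over (price, volume), maintaining the prices list
def ppaStep (ask_mode : Bool) (prices : List Int) (pv : Int × Int) : List Int :=
  if (pv.2 < 0 && ask_mode) || (pv.2 > 0 && !ask_mode) then [pv.1]
  else if pv.2 == 0 then prices ++ [pv.1]
  else prices

def process_popular_average (orders : List (Int × Int)) (ask_mode : Bool) : Int × Int :=
  let prices := orders.foldl (ppaStep ask_mode) []
  (prices.sum, (prices.length : Int))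

-- ===== PORT B =====
-- backward scan with running (sum, count); a reset entry contributes its price and stops
def ppaBack (ask_mode : Bool) : List (Int × Int) → Int → Int → Int × Int
  | [], s, c => (s, c)
  | (price, volume) :: rest, s, c =>
    if volume == 0 then ppaBack ask_mode rest (s + price) (c + 1)
    else if (if ask_mode then volume < 0 else volume > 0) then (s + price, c + 1)
    else ppaBack ask_mode rest s c

def process_popular_average_alt (orders : List (Int × Int)) (ask_mode : Bool) : Int × Int :=
  ppaBack ask_mode orders.reverse 0 0

-- ===== PRECONDITION & SPEC =====
def Spec_process_popular_average (orders : List (Int × Int)) (ask_mode : Bool) (out : Int × Int) : Prop := out = process_popular_average_alt orders ask_mode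
instance (orders : List (Int × Int)) (ask_mode : Bool) (out : Int × Int) : Decidable (Spec_process_popular_average orders ask_mode out) := by unfold Spec_process_popular_average; infer_instance

-- ===== CLAIM (what is proved, stated in full; the proofs are below) =====
def Claim_equal_process_popular_average : Prop := ∀ (orders : List (Int × Int)) (ask_mode : Bool), Dom_process_popular_average orders ask_mode → Spec_process_popular_average orders ask_mode (process_popular_average orders ask_mode)

-- ===== LEMMAS AND PROOFS =====

theorem ppaBack_reverse (ask_mode : Bool) (orders : List (Int × Int)) :
    ∀ s c : Int, ppaBack ask_mode orders.reverse s c =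
      ((orders.foldl (ppaStep ask_mode) []).sum + s,
       ((orders.foldl (ppaStep ask_mode) []).length : Int) + c) := by
  induction orders using List.reverseRecOn with
  | nil => intro s c; simp [ppaBack]
  | append_singleton l pv ih =>
    obtain ⟨price, volume⟩ := pv
    intro s c
    rw [List.reverse_append, List.foldl_append]
    simp only [List.reverse_singleton, List.singleton_append, List.foldl_cons, List.foldl_nil,
      ppaBack, ppaStep]
    by_cases h0 : volume = 0
    · simp only [h0]
      rw [if_pos (by decide), if_neg (by cases ask_mode <;> decide), if_pos (by decide)]
      rw [ih]
      simp; constructor <;> ring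
    · rw [if_neg (by simp [h0])]
      by_cases hr : (if ask_mode then volume < 0 else volume > 0)
      · rw [if_pos hr]
        have : (decide (volume < 0) && ask_mode || decide (volume > 0) && !ask_mode) = true := by
          cases ask_mode <;> simp_all
        rw [if_pos this]
        simp only [List.sum_cons, List.sum_nil, List.length_cons, List.length_nil, Prod.mk.injEq]
        omega
      · rw [if_neg hr]
        have : (decide (volume < 0) && ask_mode || decide (volume > 0) && !ask_mode) = false := by
          cases ask_mode <;> simp_all
        rw [this]
        simp only [Bool.false_eq_true, if_false, show (volume == 0) = false from by simp [h0]]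
        exact ih s c

-- ===== VERDICT (by name: the statement is the Claim_ definition above) =====
theorem process_popular_average_spec : Claim_equal_process_popular_average := by
  intro orders ask_mode _
  unfold Spec_process_popular_average process_popular_average process_popular_average_alt
  rw [ppaBack_reverse]
  simp
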